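-- pv_equiv track=rewrite | github.com/sasmithakap24/Pi-Project | performance.py | extract_fio_speeds
-- ===== SOURCE A (Python) =====
-- def extract_fio_speeds(output):
--     read_speed = write_speed = "Unknown"
--     lines = output.splitlines()
--
--     for line in lines:
--         if "read:" in line and "IOPS=" in line:
--             for part in line.split(","):
--                 if "BW=" in part:
--                     read_speed = part.strip().split("BW=")[-1].split()[0]
--         elif "write:" in line and "IOPS=" in line:
--             for part in line.split(","):
--                 if "BW=" in part:
--                     write_speed = part.strip().split("BW=")[-1].split()[0]
--
--     return read_speed, write_speed
-- ===== SOURCE B (Python) =====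
-- def _last_bw(line):
--     # value of the last comma-part of `line` containing "BW=" (None if absent or malformed)
--     for part in reversed(line.split(",")):
--         if "BW=" in part:
--             tokens = part.strip().split("BW=")[-1].split()
--             return tokens[0] if tokens else None
--     return None
--
--
-- def extract_fio_speeds(output):
--     read_speed = write_speed = "Unknown"
--     need_read = need_write = True
--     for line in reversed(output.splitlines()):
--         if "IOPS=" not in line:
--             continue
--         if "read:" in line:
--             if need_read:
--                 val = _last_bw(line)
--                 if val is not None:
--                     read_speed, need_read = val, False
--         elif "write:" in line:
--             if need_write:
--                 val = _last_bw(line)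
--                 if val is not None:
--                     write_speed, need_write = val, False
--         if not (need_read or need_write):
--             break
--     return read_speed, write_speed
-- ===== Notes on version B (the rewrite author's own statement) =====
-- stated objective: alternative
-- what changed: B scans the lines in reverse with found-flags and breaks once both speeds are set (first match in reverse = last-match-wins forward), and extracts the last BW= comma-part of a line by a single reverse scan that returns early, instead of A's forward overwrite loops.
import Mathlib
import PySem

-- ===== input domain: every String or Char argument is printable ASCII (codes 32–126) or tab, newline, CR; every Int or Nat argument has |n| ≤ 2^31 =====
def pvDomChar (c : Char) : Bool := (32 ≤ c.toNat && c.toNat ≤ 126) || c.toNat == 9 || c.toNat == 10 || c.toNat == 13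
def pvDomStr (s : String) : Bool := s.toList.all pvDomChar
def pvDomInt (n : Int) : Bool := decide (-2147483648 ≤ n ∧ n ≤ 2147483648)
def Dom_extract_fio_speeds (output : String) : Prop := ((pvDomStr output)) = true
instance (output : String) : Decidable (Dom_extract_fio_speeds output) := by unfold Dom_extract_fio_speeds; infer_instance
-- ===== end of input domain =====

-- B replaces A's forward last-match-wins overwrite loops by a reverse scan with found-flags and
-- early break (objective: alternative structure, same cost).

-- line.split(","): the separator is nonempty, so split? is always some and getD [] is never taken
def pvParts (line : String) : List String := (PySem.Str.split? line ",").getD []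

-- part.strip().split("BW=")[-1].split()  — the token list both Pythons index into
-- (split? with the nonempty separator "BW=" is always some; [-1] of the nonempty split is getLastD)
def pvBWTokens (part : String) : List String :=
  PySem.Str.split₀ (((PySem.Str.split? (PySem.Str.strip part) "BW=").getD []).getLastD "")

-- ===== PORT A =====
-- …split()[0]; headD "" is taken only where Python raises IndexError, which Pre_ excludes
def pvTokA (part : String) : String := (pvBWTokens part).headD ""

-- the inner 'for part in line.split(","): if "BW=" in part: cur = …' loop
def pvLineA (cur : String) (line : String) : String :=
  (pvParts line).foldl
    (fun acc part => if PySem.Str.isIn "BW=" part then pvTokA part else acc) cur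

def extract_fio_speeds (output : String) : String × String :=
  (PySem.Str.splitlines output).foldl
    (fun (st : String × String) line =>
      if PySem.Str.isIn "read:" line && PySem.Str.isIn "IOPS=" line then
        (pvLineA st.1 line, st.2)
      else if PySem.Str.isIn "write:" line && PySem.Str.isIn "IOPS=" line then
        (st.1, pvLineA st.2 line)
      else st)
    ("Unknown", "Unknown")

-- ===== PORT B =====
-- 'for part in reversed(line.split(",")): if "BW=" in part: return tokens[0] if tokens else None'
def pvLastBWGo : List String → Option String
  | [] => none
  | p :: rest =>
    if PySem.Str.isIn "BW=" p then (pvBWTokens p).head? else pvLastBWGo rest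

def pvLastBW (line : String) : Option String := pvLastBWGo (pvParts line).reverse

-- the reversed-lines loop with the need_read/need_write flags and the break
-- (the 'if not (need_read or need_write): break' check is transcribed into each branch)
def pvGoB : List String → String → String → Bool → Bool → String × String
  | [], r, w, _, _ => (r, w)
  | line :: rest, r, w, nr, nw =>
    if PySem.Str.isIn "IOPS=" line then
      if PySem.Str.isIn "read:" line then
        if nr then
          match pvLastBW line with
          | some v => if !(false || nw) then (v, w) else pvGoB rest v w false nw
          | none => if !(nr || nw) then (r, w) else pvGoB rest r w nr nw
        else if !(nr || nw) then (r, w) else pvGoB rest r w nr nw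
      else if PySem.Str.isIn "write:" line then
        if nw then
          match pvLastBW line with
          | some v => if !(nr || false) then (r, v) else pvGoB rest r v nr false
          | none => if !(nr || nw) then (r, w) else pvGoB rest r w nr nw
        else if !(nr || nw) then (r, w) else pvGoB rest r w nr nw
      else if !(nr || nw) then (r, w) else pvGoB rest r w nr nw
    else pvGoB rest r w nr nw

def extract_fio_speeds_alt (output : String) : String × String :=
  pvGoB (PySem.Str.splitlines output).reverse "Unknown" "Unknown" true true

-- ===== PRECONDITION & SPEC =====
-- Pre_ excludes exactly the inputs on which A raises IndexError: a scanned (read:/write: with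
-- IOPS=) line containing a comma-part whose text after its last "BW=" is empty or whitespace-only.
def Pre_extract_fio_speeds (output : String) : Prop :=
  ∀ line ∈ PySem.Str.splitlines output,
    (PySem.Str.isIn "IOPS=" line = true ∧
      (PySem.Str.isIn "read:" line = true ∨ PySem.Str.isIn "write:" line = true)) →
    ∀ part ∈ pvParts line, PySem.Str.isIn "BW=" part = true → pvBWTokens part ≠ []
instance (output : String) : Decidable (Pre_extract_fio_speeds output) := by
  unfold Pre_extract_fio_speeds; infer_instance

def pvWitness_extract_fio_speeds : String :=
  "  read: IOPS=2000, BW=7996KiB/s (8188kB/s)\n  write: IOPS=666, BW=2664KiB/s (2728kB/s)"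

def Spec_extract_fio_speeds (output : String) (out : String × String) : Prop :=
  out = extract_fio_speeds_alt output
instance (output : String) (out : String × String) : Decidable (Spec_extract_fio_speeds output out) := by
  unfold Spec_extract_fio_speeds; infer_instance

-- ===== CLAIM (what is proved, stated in full; the proofs are below) =====
def Claim_equal_extract_fio_speeds : Prop := ∀ (output : String), Dom_extract_fio_speeds output → Pre_extract_fio_speeds output → Spec_extract_fio_speeds output (extract_fio_speeds output)

-- ===== LEMMAS AND PROOFS =====

-- the per-line "value of the last BW= comma-part, if any" selector both sides reduce to
def pvG (line : String) : Option String :=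
  (pvParts line).reverse.findSome?
    (fun p => if PySem.Str.isIn "BW=" p then some (pvTokA p) else none)

def pvGR (line : String) : Option String :=
  if PySem.Str.isIn "read:" line && PySem.Str.isIn "IOPS=" line then pvG line else none

def pvGW (line : String) : Option String :=
  if !(PySem.Str.isIn "read:" line && PySem.Str.isIn "IOPS=" line)
      && (PySem.Str.isIn "write:" line && PySem.Str.isIn "IOPS=" line) then pvG line else none

lemma or_getD {α : Type} (o o' : Option α) (d : α) :
    (o.or o').getD d = o.getD (o'.getD d) := by cases o <;> rfl

lemma findSome?_singleton {α β : Type} (f : α → Option β) (x : α) :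
    List.findSome? f [x] = f x := by
  cases h : f x <;> simp [h]

-- last-match-wins overwrite fold = first match on the reversed list
lemma foldl_overwrite {α β : Type} (f : α → Option β) (l : List α) (r : β) :
    l.foldl (fun acc x => (f x).getD acc) r = (l.reverse.findSome? f).getD r := by
  induction l generalizing r with
  | nil => rfl
  | cons x rest ih =>
    simp only [List.foldl_cons, List.reverse_cons, List.findSome?_append, ih, or_getD,
      findSome?_singleton]

-- componentwise version for the pair state of A's outer loop
lemma foldl_pair_overwrite {α β : Type} (f g : α → Option β) (l : List α) (r w : β) :
    l.foldl (fun (st : β × β) x => ((f x).getD st.1, (g x).getD st.2)) (r, w)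
      = ((l.reverse.findSome? f).getD r, (l.reverse.findSome? g).getD w) := by
  induction l generalizing r w with
  | nil => rfl
  | cons x rest ih =>
    simp only [List.foldl_cons, List.reverse_cons, List.findSome?_append, ih, or_getD,
      findSome?_singleton]

-- A's inner comma loop computes the last-BW selector (no well-formedness needed: headD)
lemma pvLineA_eq (cur : String) (line : String) :
    pvLineA cur line = (pvG line).getD cur := by
  have hfun : (fun (acc : String) part => if PySem.Str.isIn "BW=" part then pvTokA part else acc)
      = (fun (acc : String) part =>
          ((fun p => if PySem.Str.isIn "BW=" p then some (pvTokA p) else none) part).getD acc) := by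
    funext acc part
    cases hb : PySem.Str.isIn "BW=" part
    · simp only [hb, Bool.false_eq_true, reduceIte, Option.getD_none]
    · simp only [hb, reduceIte, Option.getD_some]
  unfold pvLineA pvG
  rw [hfun, foldl_overwrite]

-- B's reverse part scan computes the same selector on well-formed part lists
lemma pvLastBWGo_eq (l : List String)
    (h : ∀ p ∈ l, PySem.Str.isIn "BW=" p = true → pvBWTokens p ≠ []) :
    pvLastBWGo l
      = l.findSome? (fun p => if PySem.Str.isIn "BW=" p then some (pvTokA p) else none) := by
  induction l with
  | nil => rfl
  | cons p rest ih =>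
    rw [pvLastBWGo, List.findSome?_cons]
    cases hbw : PySem.Str.isIn "BW=" p
    · simp only [hbw, Bool.false_eq_true, reduceIte]
      exact ih (fun q hq => h q (List.mem_cons_of_mem _ hq))
    · have hne := h p List.mem_cons_self hbw
      cases htoks : pvBWTokens p with
      | nil => exact absurd htoks hne
      | cons t ts =>
        simp only [hbw, reduceIte, pvTokA, htoks, List.head?_cons, List.headD_cons]

lemma pvLastBW_eq (line : String)
    (wf : ∀ part ∈ pvParts line, PySem.Str.isIn "BW=" part = true → pvBWTokens part ≠ []) :
    pvLastBW line = pvG line :=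
  pvLastBWGo_eq (pvParts line).reverse (fun p hp => wf p (List.mem_reverse.mp hp))

-- B's flagged reverse line loop computes the first read/write selector hits
lemma pvGoB_char (l : List String) (r w : String) (nr nw : Bool)
    (h : ∀ line ∈ l,
      (PySem.Str.isIn "IOPS=" line = true ∧
        (PySem.Str.isIn "read:" line = true ∨ PySem.Str.isIn "write:" line = true)) →
      ∀ part ∈ pvParts line, PySem.Str.isIn "BW=" part = true → pvBWTokens part ≠ []) :
    pvGoB l r w nr nw
      = ((if nr then (l.findSome? pvGR).getD r else r),
         (if nw then (l.findSome? pvGW).getD w else w)) := by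
  induction l generalizing r w nr nw with
  | nil => cases nr <;> cases nw <;> rfl
  | cons line rest ih =>
    have ih' := fun r w nr nw => ih r w nr nw (fun q hq => h q (List.mem_cons_of_mem _ hq))
    rw [pvGoB, List.findSome?_cons, List.findSome?_cons]
    cases hio : PySem.Str.isIn "IOPS=" line
    · have hgr : pvGR line = none := by
        simp only [pvGR, hio, Bool.and_false, Bool.false_eq_true, reduceIte]
      have hgw : pvGW line = none := by
        simp only [pvGW, hio, Bool.and_false, Bool.false_eq_true, reduceIte]
      simp only [hio, Bool.false_eq_true, reduceIte, hgr, hgw, ih']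
    · cases hr : PySem.Str.isIn "read:" line
      · have hgr : pvGR line = none := by
          simp only [pvGR, hr, Bool.false_and, Bool.false_eq_true, reduceIte]
        cases hw : PySem.Str.isIn "write:" line
        · have hgw : pvGW line = none := by
            simp only [pvGW, hw, Bool.false_and, Bool.and_false, Bool.false_eq_true, reduceIte]
          cases nr <;> cases nw <;>
            simp only [hio, hr, hw, Bool.false_eq_true, reduceIte, hgr, hgw, ih',
              Bool.or_false, Bool.or_true, Bool.false_or, Bool.true_or, Bool.not_true,
              Bool.not_false, Bool.false_eq_true, reduceIte]
        · have hg : pvLastBW line = pvG line :=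
            pvLastBW_eq line (h line List.mem_cons_self ⟨hio, Or.inr hw⟩)
          have hgw : pvGW line = pvLastBW line := by
            simp only [pvGW, hr, hio, hw, Bool.false_and, Bool.not_false, Bool.and_self,
              Bool.true_and, reduceIte, hg]
          cases hval : pvLastBW line with
          | none =>
            cases nr <;> cases nw <;>
              simp only [hio, hr, hw, Bool.false_eq_true, reduceIte, hgr, hgw, hval, ih',
                Bool.or_false, Bool.or_true, Bool.false_or, Bool.true_or, Bool.not_true,
                Bool.not_false]
          | some v =>
            cases nr <;> cases nw <;>
              simp only [hio, hr, hw, Bool.false_eq_true, reduceIte, hgr, hgw, hval, ih',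
                Bool.or_false, Bool.or_true, Bool.false_or, Bool.true_or, Bool.not_true,
                Bool.not_false, Option.getD_some]
      · have hg : pvLastBW line = pvG line :=
          pvLastBW_eq line (h line List.mem_cons_self ⟨hio, Or.inl hr⟩)
        have hgr : pvGR line = pvLastBW line := by
          simp only [pvGR, hr, hio, Bool.and_self, reduceIte, hg]
        have hgw : pvGW line = none := by
          simp only [pvGW, hr, hio, Bool.and_self, Bool.not_true, Bool.false_and,
            Bool.false_eq_true, reduceIte]
        cases hval : pvLastBW line with
        | none =>
          cases nr <;> cases nw <;>
            simp only [hio, hr, Bool.false_eq_true, reduceIte, hgr, hgw, hval, ih',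
              Bool.or_false, Bool.or_true, Bool.false_or, Bool.true_or, Bool.not_true,
              Bool.not_false]
        | some v =>
          cases nr <;> cases nw <;>
            simp only [hio, hr, Bool.false_eq_true, reduceIte, hgr, hgw, hval, ih',
              Bool.or_false, Bool.or_true, Bool.false_or, Bool.true_or, Bool.not_true,
              Bool.not_false, Option.getD_some]

-- A's outer fold in componentwise form
lemma extract_fio_speeds_eq (output : String) :
    extract_fio_speeds output
      = (((PySem.Str.splitlines output).reverse.findSome? pvGR).getD "Unknown",
         ((PySem.Str.splitlines output).reverse.findSome? pvGW).getD "Unknown") := by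
  have hstep : (fun (st : String × String) line =>
      if PySem.Str.isIn "read:" line && PySem.Str.isIn "IOPS=" line then
        (pvLineA st.1 line, st.2)
      else if PySem.Str.isIn "write:" line && PySem.Str.isIn "IOPS=" line then
        (st.1, pvLineA st.2 line)
      else st)
      = (fun (st : String × String) line => ((pvGR line).getD st.1, (pvGW line).getD st.2)) := by
    funext st line
    cases hr : (PySem.Str.isIn "read:" line && PySem.Str.isIn "IOPS=" line)
    · cases hw : (PySem.Str.isIn "write:" line && PySem.Str.isIn "IOPS=" line)
      · simp only [hr, hw, Bool.false_eq_true, reduceIte, pvGR, pvGW, Bool.not_false,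
          Bool.true_and, Option.getD_none]
      · simp only [hr, hw, Bool.false_eq_true, reduceIte, pvGR, pvGW, Bool.not_false,
          Bool.true_and, Option.getD_none, pvLineA_eq]
    · simp only [hr, reduceIte, pvGR, pvGW, Bool.not_true, Bool.false_and,
        Bool.false_eq_true, Option.getD_none, pvLineA_eq]
  unfold extract_fio_speeds
  rw [hstep, foldl_pair_overwrite]

-- ===== VERDICT (by name: the statement is the Claim_ definition above) =====
theorem extract_fio_speeds_spec : Claim_equal_extract_fio_speeds := by
  intro output _ hpre
  unfold Spec_extract_fio_speeds extract_fio_speeds_alt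
  rw [extract_fio_speeds_eq,
    pvGoB_char _ _ _ _ _ (fun line hline => hpre line (List.mem_reverse.mp hline))]
  rfl
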